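-- pv_equiv track=rewrite | github.com/Indranil2020/Plot_MCP | backend/gallery_rag.py | sanitize_gallery_code_for_prompt
-- ===== SOURCE A (Python) =====
-- from typing import Dict, Iterable, List, Optional, Sequence, Set
--
-- def sanitize_gallery_code_for_prompt(
--     code: str, max_lines: int = 120, max_chars: int = 6000
-- ) -> str:
--     """Reduce a gallery code sample to a compact, prompt-safe snippet."""
--     if not code.strip():
--         return ""
--
--     lines = code.splitlines()
--     output: List[str] = []
--
--     in_docstring = False
--     doc_delimiter: Optional[str] = None
--
--     for raw_line in lines:
--         line = raw_line.rstrip("\n")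
--         stripped = line.strip()
--
--         if not in_docstring and (stripped.startswith('"""') or stripped.startswith("'''")):
--             doc_delimiter = stripped[:3]
--             if stripped.count(doc_delimiter) >= 2:
--                 continue
--             in_docstring = True
--             continue
--
--         if in_docstring:
--             if doc_delimiter and doc_delimiter in stripped:
--                 in_docstring = False
--                 doc_delimiter = None
--             continue
--
--         if stripped.startswith("import ") or stripped.startswith("from "):
--             continue
--         if "plt.show(" in stripped or stripped == "plt.show()":
--             continue
--         if "sphinx_gallery_thumbnail_number" in stripped:
--             continue
--         if stripped.startswith("# %%"):
--             continue
--         if stripped.startswith("# .."):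
--             continue
--
--         output.append(line)
--         if len(output) >= max_lines:
--             break
--
--     rendered = "\n".join(output).strip()
--     if not rendered:
--         return ""
--
--     if len(rendered) > max_chars:
--         rendered = f"{rendered[:max_chars].rstrip()}\n# ... truncated"
--     return rendered
-- ===== SOURCE B (Python) =====
-- def _without_docstrings(lines):
--     """Remove docstring blocks by jumping an index cursor over them."""
--     out = []
--     i = 0
--     while i < len(lines):
--         s = lines[i].strip()
--         if s.startswith(('"""', "'''")):
--             d = s[:3]
--             if s.count(d) < 2:
--                 # multi-line docstring: jump to its closing line
--                 i += 1
--                 while i < len(lines) and d not in lines[i].strip():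
--                     i += 1
--         else:
--             out.append(lines[i])
--         i += 1
--     return out
--
--
-- def _is_code(line):
--     s = line.strip()
--     if s.startswith(("import ", "from ", "# %%", "# ..")):
--         return False
--     return "plt.show(" not in s and "sphinx_gallery_thumbnail_number" not in s
--
--
-- def sanitize_gallery_code_for_prompt(code, max_lines=120, max_chars=6000):
--     if not code.strip():
--         return ""
--     kept = [ln for ln in _without_docstrings(code.splitlines()) if _is_code(ln)]
--     rendered = "\n".join(kept[:max_lines]).strip()
--     if not rendered:
--         return ""
--     if len(rendered) > max_chars:
--         rendered = rendered[:max_chars].rstrip() + "\n# ... truncated"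
--     return rendered
-- ===== Notes on version B (the rewrite author's own statement) =====
-- stated objective: simpler
-- what changed: A's single fused loop (docstring state machine with an in_docstring flag + inline noise tests + counted append with post-append break) is replaced by an index-cursor pass that jumps over docstring blocks, a filter comprehension, and a plain [:max_lines] slice before the shared render/truncate step; Pre_ excludes non-positive max_lines, where A's post-append cap check and B's slice both give accidental, unspecified corner values.
-- outside the precondition, e.g. on sanitize_gallery_code_for_prompt('x = 1', 0, 100): A returns 'x = 1', B returns ''; on sanitize_gallery_code_for_prompt('x = 1\ny = 2\nz = 3', -1, 100): A returns 'x = 1', B returns 'x = 1\ny = 2'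
import Mathlib
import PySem

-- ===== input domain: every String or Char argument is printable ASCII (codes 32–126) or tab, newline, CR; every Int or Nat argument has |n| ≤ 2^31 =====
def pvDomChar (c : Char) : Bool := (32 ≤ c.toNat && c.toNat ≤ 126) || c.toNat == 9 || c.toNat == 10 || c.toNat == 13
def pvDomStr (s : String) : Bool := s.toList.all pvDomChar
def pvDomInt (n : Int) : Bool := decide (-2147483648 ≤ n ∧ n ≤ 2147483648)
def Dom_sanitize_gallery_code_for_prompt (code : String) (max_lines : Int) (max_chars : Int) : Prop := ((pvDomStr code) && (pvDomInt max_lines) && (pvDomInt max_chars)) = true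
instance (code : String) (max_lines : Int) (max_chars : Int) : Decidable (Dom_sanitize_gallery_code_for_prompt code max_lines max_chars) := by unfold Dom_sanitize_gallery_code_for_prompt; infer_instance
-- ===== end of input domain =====

-- B replaces A's fused state-machine loop by an index-cursor pass that jumps over docstring
-- blocks, a filter comprehension, and a plain slice to max_lines (objective: simpler);
-- non-positive max_lines is excluded by Pre_ (see its comment).

-- ===== PORT A =====
-- raw_line.rstrip("\n"): hand port (PySem has no rstrip-with-chars form); exact: it drops exactly the trailing '\n' characters
def pvRstripNL (s : String) : String :=
  String.ofList ((s.toList.reverse.dropWhile (fun c => c == '\n')).reverse)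

-- the fused for-loop of A, state (in_docstring, doc_delimiter, output), early `break` on max_lines
def pvLoopA (max_lines : Int) : List String → Bool → Option String → List String → List String
  | [], _, _, output => output
  | raw_line :: rest, in_doc, delim, output =>
    let line := pvRstripNL raw_line
    let stripped := PySem.Str.strip line
    if !in_doc && (PySem.Str.startswith stripped "\"\"\"" || PySem.Str.startswith stripped "'''") then
      let d := PySem.Str.slice stripped none (some 3)
      if 2 ≤ PySem.Str.count stripped d then
        pvLoopA max_lines rest in_doc (some d) output
      else
        pvLoopA max_lines rest true (some d) output
    else if in_doc then
      -- `if doc_delimiter and doc_delimiter in stripped` (truthiness: non-None and non-empty)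
      if (match delim with
          | some d => !(d == "") && PySem.Str.isIn d stripped
          | none => false) then
        pvLoopA max_lines rest false none output
      else
        pvLoopA max_lines rest in_doc delim output
    else if PySem.Str.startswith stripped "import " || PySem.Str.startswith stripped "from " then
      pvLoopA max_lines rest in_doc delim output
    else if PySem.Str.isIn "plt.show(" stripped || stripped == "plt.show()" then
      pvLoopA max_lines rest in_doc delim output
    else if PySem.Str.isIn "sphinx_gallery_thumbnail_number" stripped then
      pvLoopA max_lines rest in_doc delim output
    else if PySem.Str.startswith stripped "# %%" then
      pvLoopA max_lines rest in_doc delim output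
    else if PySem.Str.startswith stripped "# .." then
      pvLoopA max_lines rest in_doc delim output
    else
      let output' := output ++ [line]
      if max_lines ≤ (output'.length : Int) then output'
      else pvLoopA max_lines rest in_doc delim output'

def sanitize_gallery_code_for_prompt (code : String) (max_lines : Int) (max_chars : Int) : String :=
  if PySem.Str.strip code = "" then ""
  else
    let lines := PySem.Str.splitlines code
    let output := pvLoopA max_lines lines false none []
    let rendered := PySem.Str.strip (PySem.Str.join "\n" output)
    if rendered = "" then ""
    else if max_chars < PySem.Str.len rendered then
      PySem.Str.rstrip (PySem.Str.slice rendered none (some max_chars)) ++ "\n# ... truncated"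
    else rendered

-- ===== PORT B =====
-- inner `while i < len(lines) and d not in lines[i].strip(): i += 1` followed by the outer `i += 1`:
-- the lines after the closing-delimiter line (or [] if none)
def pvSkipClose (d : String) : List String → List String
  | [] => []
  | l :: rest => if PySem.Str.isIn d (PySem.Str.strip l) then rest else pvSkipClose d rest

-- termination measure for pvWithoutDocstrings (cited by its decreasing_by)
lemma pvSkipClose_len (d : String) (xs : List String) : (pvSkipClose d xs).length ≤ xs.length := by
  induction xs with
  | nil => simp [pvSkipClose]
  | cons x rest ih =>
    simp only [pvSkipClose]
    split_ifs <;> simp <;> omega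

-- _without_docstrings: index-cursor loop; docstring openers jump the cursor past the closing line
def pvWithoutDocstrings : List String → List String
  | [] => []
  | line :: rest =>
    let s := PySem.Str.strip line
    if PySem.Str.startswith s "\"\"\"" || PySem.Str.startswith s "'''" then
      if PySem.Str.count s (PySem.Str.slice s none (some 3)) < 2 then
        pvWithoutDocstrings (pvSkipClose (PySem.Str.slice s none (some 3)) rest)
      else
        pvWithoutDocstrings rest
    else
      line :: pvWithoutDocstrings rest
termination_by ls => ls.length
decreasing_by
· have := pvSkipClose_len (PySem.Str.slice (PySem.Str.strip line) none (some 3)) rest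
  simp only [List.length_cons]
  omega
· simp
· simp

-- _is_code
def pvIsCode (line : String) : Bool :=
  let s := PySem.Str.strip line
  if PySem.Str.startswith s "import " || PySem.Str.startswith s "from " ||
     PySem.Str.startswith s "# %%" || PySem.Str.startswith s "# .." then
    false
  else
    !(PySem.Str.isIn "plt.show(" s) && !(PySem.Str.isIn "sphinx_gallery_thumbnail_number" s)

def sanitize_gallery_code_for_prompt_alt (code : String) (max_lines : Int) (max_chars : Int) : String :=
  if PySem.Str.strip code = "" then ""
  else
    let kept := List.filter pvIsCode (pvWithoutDocstrings (PySem.Str.splitlines code))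
    let rendered := PySem.Str.strip (PySem.Str.join "\n" (PySem.List.slice kept none (some max_lines)))
    if rendered = "" then ""
    else if max_chars < PySem.Str.len rendered then
      PySem.Str.rstrip (PySem.Str.slice rendered none (some max_chars)) ++ "\n# ... truncated"
    else rendered

-- ===== PRECONDITION & SPEC =====
-- Pre_ excludes non-positive max_lines, on which A still returns: there A's post-append cap check
-- accidentally emits the first surviving line while B's kept[:max_lines] slice gives Python's
-- accidental empty/negative-slice value; neither corner behaviour is a specified one.
def Pre_sanitize_gallery_code_for_prompt (code : String) (max_lines : Int) (max_chars : Int) : Prop :=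
  1 ≤ max_lines
instance (code : String) (max_lines : Int) (max_chars : Int) : Decidable (Pre_sanitize_gallery_code_for_prompt code max_lines max_chars) := by unfold Pre_sanitize_gallery_code_for_prompt; infer_instance

def pvWitness_sanitize_gallery_code_for_prompt : String × Int × Int := ("x = 1\n\"\"\"doc\"\"\"\nimport os\ny = 2", 2, 50)

def Spec_sanitize_gallery_code_for_prompt (code : String) (max_lines : Int) (max_chars : Int) (out : String) : Prop := out = sanitize_gallery_code_for_prompt_alt code max_lines max_chars
instance (code : String) (max_lines : Int) (max_chars : Int) (out : String) : Decidable (Spec_sanitize_gallery_code_for_prompt code max_lines max_chars out) := by unfold Spec_sanitize_gallery_code_for_prompt; infer_instance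

-- ===== CLAIM (what is proved, stated in full; the proofs are below) =====
def Claim_equal_sanitize_gallery_code_for_prompt : Prop := ∀ (code : String) (max_lines : Int) (max_chars : Int), Dom_sanitize_gallery_code_for_prompt code max_lines max_chars → Pre_sanitize_gallery_code_for_prompt code max_lines max_chars → Spec_sanitize_gallery_code_for_prompt code max_lines max_chars (sanitize_gallery_code_for_prompt code max_lines max_chars)

-- ===== LEMMAS AND PROOFS =====

-- A's noise predicate in A's disjunct order (proof helper)
def pvIsNoise (line : String) : Bool :=
  let s := PySem.Str.strip line
  PySem.Str.startswith s "import " || PySem.Str.startswith s "from " ||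
  PySem.Str.isIn "plt.show(" s || PySem.Str.isIn "sphinx_gallery_thumbnail_number" s ||
  PySem.Str.startswith s "# %%" || PySem.Str.startswith s "# .."

-- A's docstring pass written as the explicit state machine (proof helper used to bridge the two ports)
def pvDocPass : List String → Option String → List String → List String
  | [], _, kept => kept
  | line :: rest, delim, kept =>
    let s := PySem.Str.strip line
    match delim with
    | none =>
      if PySem.Str.startswith s "\"\"\"" || PySem.Str.startswith s "'''" then
        let d := PySem.Str.slice s none (some 3)
        if PySem.Str.count s d < 2 then pvDocPass rest (some d) kept
        else pvDocPass rest none kept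
      else pvDocPass rest none (kept ++ [line])
    | some d => if PySem.Str.isIn d s then pvDocPass rest none kept else pvDocPass rest (some d) kept

-- every piece produced by splitlines contains no line-break character
lemma pvSplitlinesGo_no_break (isB : Char → Bool) (s cur : List Char) (acc : List (List Char))
    (hcur : ∀ c ∈ cur, isB c = false)
    (hacc : ∀ l ∈ acc, ∀ c ∈ l, isB c = false) :
    ∀ l ∈ PySem.Chars.splitlines.go isB s cur acc, ∀ c ∈ l, isB c = false := by
  induction s, cur, acc using PySem.Chars.splitlines.go.induct isB with
  | case1 cur acc h =>
    simpa [PySem.Chars.splitlines.go, h] using hacc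
  | case2 cur acc h =>
    simp only [PySem.Chars.splitlines.go, h]
    intro l hl
    simp only [Bool.false_eq_true, if_false, List.mem_reverse, List.mem_cons] at hl
    rcases hl with h1 | h1
    · subst h1; intro c hc; exact hcur c (List.mem_reverse.mp hc)
    · exact hacc l h1
  | case3 rest cur acc ih =>
    simp only [PySem.Chars.splitlines.go]
    exact ih (by simp) (by
      intro l hl c hc
      rcases List.mem_cons.mp hl with h1 | h1
      · subst h1; exact hcur c (List.mem_reverse.mp hc)
      · exact hacc l h1 c hc)
  | case4 c rest cur acc hne hB ih =>
    have hgo : PySem.Chars.splitlines.go isB (c :: rest) cur acc =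
        PySem.Chars.splitlines.go isB rest [] (cur.reverse :: acc) := by
      rw [PySem.Chars.splitlines.go]
      split
      · rfl
      · simp_all
      case x_3 => exact hne
    rw [hgo]
    exact ih (by simp) (by
      intro l hl c' hc'
      rcases List.mem_cons.mp hl with h1 | h1
      · subst h1; exact hcur c' (List.mem_reverse.mp hc')
      · exact hacc l h1 c' hc')
  | case5 c rest cur acc hne hB ih =>
    have hgo : PySem.Chars.splitlines.go isB (c :: rest) cur acc =
        PySem.Chars.splitlines.go isB rest (c :: cur) acc := by
      rw [PySem.Chars.splitlines.go]
      split
      · simp_all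
      · rfl
      case x_3 => exact hne
    rw [hgo]
    exact ih (by
      intro c' hc'
      rcases List.mem_cons.mp hc' with h1 | h1
      · subst h1; exact Bool.eq_false_iff.mpr hB
      · exact hcur c' h1) hacc

lemma pvSplitlines_no_newline (code : String) :
    ∀ l ∈ PySem.Str.splitlines code, '\n' ∉ l.toList := by
  intro l hl hmem
  have h1 : l.toList ∈ List.map String.toList (PySem.Str.splitlines code) :=
    List.mem_map_of_mem hl
  rw [PySem.Str.splitlines_map_toList] at h1
  unfold PySem.Chars.splitlines at h1
  have := pvSplitlinesGo_no_break _ code.toList [] [] (by simp) (by simp) l.toList h1 '\n' hmem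
  simp at this

lemma pvRstripNL_eq {s : String} (h : '\n' ∉ s.toList) : pvRstripNL s = s := by
  unfold pvRstripNL
  have h2 : s.toList.reverse.dropWhile (fun c => c == '\n') = s.toList.reverse := by
    apply List.dropWhile_eq_self_iff.mpr
    intro hlen
    simp only [beq_iff_eq]
    intro heq
    exact h (by rw [← heq]; exact List.mem_reverse.mp (List.getElem_mem hlen))
  rw [h2]; simp

-- pvDocPass's accumulator distributes as an append
lemma pvDocPass_accum (lines : List String) :
    ∀ (delim : Option String) (kept : List String),
      pvDocPass lines delim kept = kept ++ pvDocPass lines delim [] := by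
  induction lines with
  | nil => intro delim kept; simp [pvDocPass]
  | cons line rest ih =>
    intro delim kept
    cases delim with
    | none =>
      simp only [pvDocPass]
      split_ifs with h1 h2
      · exact ih _ kept
      · exact ih _ kept
      · rw [ih none (kept ++ [line]), ih none ([] ++ [line])]
        simp
    | some d =>
      simp only [pvDocPass]
      split_ifs with h1
      · exact ih _ kept
      · exact ih _ kept

lemma pvFilterDrop (x : String) (xs : List String) (h : pvIsNoise x = true) :
    List.filter (fun ln => !pvIsNoise ln) (x :: xs) = List.filter (fun ln => !pvIsNoise ln) xs := by
  simp [List.filter, h]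

lemma pvFilterKeep (x : String) (xs : List String) (h : pvIsNoise x = false) :
    List.filter (fun ln => !pvIsNoise ln) (x :: xs) =
      x :: List.filter (fun ln => !pvIsNoise ln) xs := by
  simp [List.filter, h]

-- the redundant `stripped == "plt.show()"` disjunct of A is absorbed by the `in` test
lemma pvPltAbsorb (s : String) :
    (PySem.Str.isIn "plt.show(" s || s == "plt.show()") = PySem.Str.isIn "plt.show(" s := by
  by_cases h : s = "plt.show()"
  · subst h; decide
  · simp [h]

-- the recorded delimiter is never the empty string
lemma pvDelim_ne (s : String)
    (h : (PySem.Str.startswith s "\"\"\"" || PySem.Str.startswith s "'''") = true) :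
    PySem.Str.slice s none (some 3) ≠ "" := by
  have hlen : 3 ≤ s.toList.length := by
    rw [Bool.or_eq_true] at h
    rcases h with h1 | h1
    · have h2 : PySem.Chars.startswith s.toList "\"\"\"".toList = true := by
        rw [← PySem.Str.startswith_eq]; exact h1
      have hp := (PySem.Chars.startswith_iff _ _).mp h2
      simpa using hp.length_le
    · have h2 : PySem.Chars.startswith s.toList "'''".toList = true := by
        rw [← PySem.Str.startswith_eq]; exact h1
      have hp := (PySem.Chars.startswith_iff _ _).mp h2
      simpa using hp.length_le
  intro hcon
  have h3 : (PySem.Str.slice s none (some 3)).toList = [] := by rw [hcon]; rfl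
  rw [PySem.Str.toList_slice] at h3
  rw [PySem.Chars.slice_eq_listSlice] at h3
  rw [PySem.List.slice_to _ (by omega : (0:Int) ≤ 3)] at h3
  have h4 := congrArg List.length h3
  simp only [List.length_take, List.length_nil] at h4
  omega

-- main loop characterisation: A's fused loop = docstring pass, then noise filter, then take
lemma pvLoopA_eq (max_lines : Int) (lines : List String) :
    ∀ (in_doc : Bool) (delim : Option String) (output : List String),
      (∀ l ∈ lines, '\n' ∉ l.toList) →
      (in_doc = true → ∃ d, delim = some d ∧ d ≠ "") →
      pvLoopA max_lines lines in_doc delim output =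
        output ++ List.take
          (if (output.length : Int) < max_lines then (max_lines - output.length).toNat else 1)
          (List.filter (fun ln => !pvIsNoise ln)
            (pvDocPass lines (if in_doc then delim else none) [])) := by
  induction lines with
  | nil => intro in_doc delim output _ _; simp [pvLoopA, pvDocPass]
  | cons line rest ih =>
    intro in_doc delim output hl hdoc
    have hline : '\n' ∉ line.toList := hl line (List.mem_cons_self ..)
    have hrest : ∀ l ∈ rest, '\n' ∉ l.toList := fun l h => hl l (List.mem_cons_of_mem _ h)
    simp only [pvLoopA, pvRstripNL_eq hline]
    cases in_doc with
    | true =>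
      obtain ⟨d, hd, hdne⟩ := hdoc rfl
      subst hd
      have hdb : (d == "") = false := by simpa using hdne
      simp only [Bool.not_true, Bool.false_and, Bool.false_eq_true, if_false, if_true,
        pvDocPass, hdb, Bool.not_false, Bool.true_and]
      by_cases hin : PySem.Str.isIn d (PySem.Str.strip line) = true
      · rw [if_pos hin, if_pos hin, ih false none output hrest (by simp)]
        simp
      · rw [if_neg hin, if_neg hin, ih true (some d) output hrest (fun _ => ⟨d, rfl, hdne⟩)]
        simp
    | false =>
      simp only [Bool.not_false, Bool.true_and, Bool.false_eq_true, if_false, pvDocPass]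
      by_cases h1 : (PySem.Str.startswith (PySem.Str.strip line) "\"\"\""
          || PySem.Str.startswith (PySem.Str.strip line) "'''") = true
      · rw [if_pos h1, if_pos h1]
        by_cases hc : 2 ≤ PySem.Str.count (PySem.Str.strip line)
            (PySem.Str.slice (PySem.Str.strip line) none (some 3))
        · have hcc : ¬ (PySem.Str.count (PySem.Str.strip line)
              (PySem.Str.slice (PySem.Str.strip line) none (some 3)) < 2) := by omega
          rw [if_pos hc, if_neg hcc,
            ih false (some (PySem.Str.slice (PySem.Str.strip line) none (some 3)))
              output hrest (by simp)]
          simp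
        · have hcc : PySem.Str.count (PySem.Str.strip line)
              (PySem.Str.slice (PySem.Str.strip line) none (some 3)) < 2 := by omega
          rw [if_neg hc, if_pos hcc,
            ih true (some (PySem.Str.slice (PySem.Str.strip line) none (some 3)))
              output hrest (fun _ => ⟨_, rfl, pvDelim_ne _ h1⟩)]
          simp
      · rw [if_neg h1, if_neg h1]
        rw [pvDocPass_accum rest none ([] ++ [line]), List.nil_append, List.singleton_append]
        have hskip := ih false delim output hrest (by simp)
        simp only [Bool.false_eq_true, if_false] at hskip ⊢
        by_cases h2 : (PySem.Str.startswith (PySem.Str.strip line) "import "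
            || PySem.Str.startswith (PySem.Str.strip line) "from ") = true
        · rw [if_pos h2, hskip, pvFilterDrop line (pvDocPass rest none []) (by
            simp only [pvIsNoise, Bool.or_eq_true] at h2 ⊢
            exact Or.inl (Or.inl (Or.inl (Or.inl h2))))]
        · rw [if_neg h2]
          by_cases h3 : (PySem.Str.isIn "plt.show(" (PySem.Str.strip line)
              || PySem.Str.strip line == "plt.show()") = true
          · rw [if_pos h3, hskip, pvFilterDrop line (pvDocPass rest none []) (by
              rw [pvPltAbsorb] at h3
              simp only [pvIsNoise, Bool.or_eq_true] at h3 ⊢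
              exact Or.inl (Or.inl (Or.inl (Or.inr h3))))]
          · rw [if_neg h3]
            by_cases h4 : PySem.Str.isIn "sphinx_gallery_thumbnail_number" (PySem.Str.strip line) = true
            · rw [if_pos h4, hskip, pvFilterDrop line (pvDocPass rest none []) (by
                simp only [pvIsNoise, Bool.or_eq_true] at h4 ⊢
                exact Or.inl (Or.inl (Or.inr h4)))]
            · rw [if_neg h4]
              by_cases h5 : PySem.Str.startswith (PySem.Str.strip line) "# %%" = true
              · rw [if_pos h5, hskip, pvFilterDrop line (pvDocPass rest none []) (by
                  simp only [pvIsNoise, Bool.or_eq_true] at h5 ⊢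
                  exact Or.inl (Or.inr h5))]
              · rw [if_neg h5]
                by_cases h6 : PySem.Str.startswith (PySem.Str.strip line) "# .." = true
                · rw [if_pos h6, hskip, pvFilterDrop line (pvDocPass rest none []) (by
                    simp only [pvIsNoise, Bool.or_eq_true] at h6 ⊢
                    exact Or.inr h6)]
                · rw [if_neg h6]
                  -- no test fired: the line is kept
                  have hnn : pvIsNoise line = false := by
                    rw [pvPltAbsorb] at h3
                    simp only [pvIsNoise]
                    simp only [Bool.or_eq_true, not_or] at h2 h3 h4 h5 h6
                    simp only [Bool.or_eq_true, Bool.eq_false_iff, Ne, not_or]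
                    exact ⟨⟨⟨⟨⟨h2.1, h2.2⟩, h3⟩, h4⟩, h5⟩, h6⟩
                  rw [pvFilterKeep _ _ hnn]
                  by_cases hbrk : max_lines ≤ ((output ++ [line]).length : Int)
                  · rw [if_pos hbrk]
                    simp only [List.length_append, List.length_cons, List.length_nil] at hbrk
                    have hn1 : (if (output.length : Int) < max_lines
                        then (max_lines - output.length).toNat else 1) = 1 := by
                      split_ifs with h <;> omega
                    rw [hn1]
                    simp [List.take_succ_cons]
                  · rw [if_neg hbrk, ih false delim (output ++ [line]) hrest (by simp)]
                    simp only [Bool.false_eq_true, if_false, List.length_append, List.length_cons,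
                      List.length_nil] at hbrk ⊢
                    push_cast at hbrk ⊢
                    rw [if_pos (by omega), if_pos (by omega)]
                    have hn2 : (max_lines - (output.length : Int)).toNat
                        = (max_lines - ((output.length : Int) + 1)).toNat + 1 := by omega
                    rw [hn2, List.take_succ_cons]
                    simp

-- the two noise predicates agree pointwise
lemma pvIsCode_eq (l : String) : pvIsCode l = !pvIsNoise l := by
  simp only [pvIsCode, pvIsNoise]
  cases h1 : PySem.Str.startswith (PySem.Str.strip l) "import " <;>
  cases h2 : PySem.Str.startswith (PySem.Str.strip l) "from " <;>
  cases h3 : PySem.Str.isIn "plt.show(" (PySem.Str.strip l) <;>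
  cases h4 : PySem.Str.isIn "sphinx_gallery_thumbnail_number" (PySem.Str.strip l) <;>
  cases h5 : PySem.Str.startswith (PySem.Str.strip l) "# %%" <;>
  cases h6 : PySem.Str.startswith (PySem.Str.strip l) "# .." <;>
  simp [h1, h2, h3, h4, h5, h6]

-- the state machine and the index-cursor pass compute the same lines
lemma pvDoc_eq (lines : List String) :
    pvDocPass lines none [] = pvWithoutDocstrings lines ∧
    ∀ d, pvDocPass lines (some d) [] = pvWithoutDocstrings (pvSkipClose d lines) := by
  induction lines with
  | nil =>
    refine ⟨by simp [pvDocPass, pvWithoutDocstrings], ?_⟩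
    intro d; simp [pvDocPass, pvSkipClose, pvWithoutDocstrings]
  | cons line rest ih =>
    obtain ⟨ih1, ih2⟩ := ih
    constructor
    · simp only [pvDocPass, pvWithoutDocstrings]
      split_ifs with h1 h2
      · exact ih2 _
      · exact ih1
      · rw [pvDocPass_accum rest none ([] ++ [line]), ih1]
        simp
    · intro d
      simp only [pvDocPass, pvSkipClose]
      split_ifs with h1
      · exact ih1
      · exact ih2 d

-- ===== VERDICT (by name: the statement is the Claim_ definition above) =====
theorem sanitize_gallery_code_for_prompt_spec : Claim_equal_sanitize_gallery_code_for_prompt := by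
  unfold Claim_equal_sanitize_gallery_code_for_prompt
  intro code max_lines max_chars _ hpre
  unfold Pre_sanitize_gallery_code_for_prompt at hpre
  unfold Spec_sanitize_gallery_code_for_prompt
  unfold sanitize_gallery_code_for_prompt sanitize_gallery_code_for_prompt_alt
  by_cases h0 : PySem.Str.strip code = ""
  · simp [h0]
  · rw [if_neg h0, if_neg h0]
    dsimp only
    rw [pvLoopA_eq max_lines (PySem.Str.splitlines code) false none []
      (pvSplitlines_no_newline code) (by simp)]
    have hfil : List.filter pvIsCode (pvWithoutDocstrings (PySem.Str.splitlines code))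
        = List.filter (fun ln => !pvIsNoise ln) (pvDocPass (PySem.Str.splitlines code) none []) := by
      rw [(pvDoc_eq (PySem.Str.splitlines code)).1]
      exact List.filter_congr (fun x _ => by rw [pvIsCode_eq])
    rw [hfil]
    rw [PySem.List.slice_to _ (by omega : (0:Int) ≤ max_lines)]
    have harg : (if ((List.length ([] : List String)) : Int) < max_lines
        then (max_lines - (List.length ([] : List String))).toNat else 1)
        = max_lines.toNat := by
      simp only [List.length_nil, Int.natCast_zero]
      split_ifs with h <;> omega
    rw [harg]
    simp
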